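-- pv_equiv track=rewrite | github.com/metamorph-inc/meta-core | externals/HCDDES/src/lib/BlockTemplate/Python/GetCoefficients.py | GetCoefficientAux
-- ===== SOURCE A (Python) =====
-- def GetCoefficientAux( zp_list, offset, power ):
--
--     if power == len( zp_list ):
--         return zp_list[ offset ]
--
--     result = 0
--     power += 1
--     for subOffset in range( offset + 1, power ):
--         result += GetCoefficientAux( zp_list, subOffset, power )
--
--     return zp_list[ offset ] * result
-- ===== SOURCE B (Python) =====
-- def GetCoefficientAux(zp_list, offset, power):
--     # Bottom-up DP over levels p = n-1 .. power with running suffix sums,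
--     # instead of A's branching recursion: each (offset, power) value is computed once.
--     n = len(zp_list)
--     if power == n:
--         return zp_list[offset]
--     if offset >= power:
--         return 0
--     width = power - offset               # every level's table has this length
--     # level n: values f(o, n) = zp_list[o] for o in [offset + (n - power), n - 1]
--     cur = [zp_list[o] for o in range(offset + (n - power), n)]
--     p = n - 1
--     while p >= power:
--         lo = offset + (p - power)        # level p covers offsets [lo, p - 1]
--         rest = sum(cur)                  # = sum of level p+1 values f(s, p+1), s in [lo+1, p]
--         nxt = []
--         for i in range(width):
--             nxt.append(zp_list[lo + i] * rest)
--             rest -= cur[i]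
--         cur = nxt
--         p -= 1
--     return cur[0]
-- ===== Notes on version B (the rewrite author's own statement) =====
-- stated objective: alternative
-- what changed: Replaced A's branching recursion over (offset, power) by a bottom-up dynamic program that builds each level's table once and reuses running suffix sums, so each (offset, power) value is computed exactly once.
import Mathlib
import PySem

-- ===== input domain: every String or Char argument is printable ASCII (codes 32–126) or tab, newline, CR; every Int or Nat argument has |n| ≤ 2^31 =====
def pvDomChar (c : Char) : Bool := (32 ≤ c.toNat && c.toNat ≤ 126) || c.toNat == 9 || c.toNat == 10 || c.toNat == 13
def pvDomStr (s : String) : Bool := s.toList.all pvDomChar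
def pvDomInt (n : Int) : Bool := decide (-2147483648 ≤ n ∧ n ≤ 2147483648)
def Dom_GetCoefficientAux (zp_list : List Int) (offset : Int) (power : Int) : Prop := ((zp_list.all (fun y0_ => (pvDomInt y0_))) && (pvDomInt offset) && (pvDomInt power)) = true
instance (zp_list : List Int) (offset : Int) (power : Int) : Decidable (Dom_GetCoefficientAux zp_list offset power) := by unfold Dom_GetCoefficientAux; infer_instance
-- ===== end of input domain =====

-- B replaces A's branching recursion over (offset, power) by a bottom-up
-- level-by-level DP with running suffix sums (objective: alternative).

-- ===== PORT A =====
-- zp_list[i] (valid under Pre_; default never observed inside Pre_)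
def pyAt (zp_list : List Int) (i : Int) : Int := (PySem.List.pyGet? zp_list i).getD 0

-- A's recursion; the Nat fuel only makes the same computation total
-- (it is exhausted only when the Python recursion never terminates, outside Pre_).
def GetCoefficientAuxF (zp_list : List Int) : Nat → Int → Int → Int
  | 0, _, _ => 0
  | fuel+1, offset, power =>
      if power = (zp_list.length : Int) then pyAt zp_list offset
      else
        let power' := power + 1
        let result := (PySem.List.pyRange (offset + 1) power' 1).foldl
            (fun r s => r + GetCoefficientAuxF zp_list fuel s power') 0
        pyAt zp_list offset * result

def GetCoefficientAux (zp_list : List Int) (offset : Int) (power : Int) : Int :=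
  GetCoefficientAuxF zp_list (((zp_list.length : Int) - power).toNat + 1) offset power

-- ===== PORT B =====
-- inner 'for i in range(width)' loop of Source B
def altInner (zp_list cur : List Int) (lo width rest : Int) : List Int × Int :=
  (PySem.List.pyRange 0 width 1).foldl
    (fun (st : List Int × Int) i =>
      (st.1 ++ [pyAt zp_list (lo + i) * st.2], st.2 - pyAt cur i))
    ([], rest)

-- outer 'while p >= power' loop of Source B (fuel = exact iteration count)
def altLoop (zp_list : List Int) (offset power width : Int) : Nat → Int → List Int → List Int
  | 0, _, cur => cur
  | k+1, p, cur =>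
      let lo := offset + (p - power)
      let rest := cur.foldl (· + ·) 0
      altLoop zp_list offset power width k (p - 1) (altInner zp_list cur lo width rest).1

def GetCoefficientAux_alt (zp_list : List Int) (offset : Int) (power : Int) : Int :=
  let n : Int := zp_list.length
  if power = n then pyAt zp_list offset
  else if offset ≥ power then 0
  else
    let width := power - offset
    let cur0 := (PySem.List.pyRange (offset + (n - power)) n 1).map (fun o => pyAt zp_list o)
    let cur := altLoop zp_list offset power width (n - power).toNat (n - 1) cur0
    pyAt cur 0

-- ===== PRECONDITION & SPEC =====
-- Exactly the inputs where the Python A returns: the offset must be a valid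
-- (possibly negative) index, and power ≤ len (for power > len A recurses forever).
def Pre_GetCoefficientAux (zp_list : List Int) (offset : Int) (power : Int) : Prop :=
  -(zp_list.length : Int) ≤ offset ∧ offset < (zp_list.length : Int) ∧ power ≤ (zp_list.length : Int)
instance (zp_list : List Int) (offset : Int) (power : Int) : Decidable (Pre_GetCoefficientAux zp_list offset power) := by unfold Pre_GetCoefficientAux; infer_instance

def pvWitness_GetCoefficientAux : List Int × Int × Int := ([1, 2, 3], 0, 1)

def Spec_GetCoefficientAux (zp_list : List Int) (offset : Int) (power : Int) (out : Int) : Prop := out = GetCoefficientAux_alt zp_list offset power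
instance (zp_list : List Int) (offset : Int) (power : Int) (out : Int) : Decidable (Spec_GetCoefficientAux zp_list offset power out) := by unfold Spec_GetCoefficientAux; infer_instance

-- ===== CLAIM (what is proved, stated in full; the proofs are below) =====
def Claim_equal_GetCoefficientAux : Prop := ∀ (zp_list : List Int) (offset : Int) (power : Int), Dom_GetCoefficientAux zp_list offset power → Pre_GetCoefficientAux zp_list offset power → Spec_GetCoefficientAux zp_list offset power (GetCoefficientAux zp_list offset power)

-- ===== LEMMAS AND PROOFS =====

-- the mathematical value: level k below the top (power = len - k)
def Fspec (zp_list : List Int) : Nat → Int → Int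
  | 0, o => pyAt zp_list o
  | k+1, o => pyAt zp_list o *
      ((PySem.List.pyRange (o + 1) ((zp_list.length : Int) - k) 1).foldl
        (fun r s => r + Fspec zp_list k s) 0)

def sumTo (f : Int → Int) (a b : Int) : Int :=
  (PySem.List.pyRange a b 1).foldl (fun r s => r + f s) 0

lemma foldl_add_shift (f : Int → Int) (l : List Int) (c : Int) :
    l.foldl (fun r s => r + f s) c = c + l.foldl (fun r s => r + f s) 0 := by
  induction l generalizing c with
  | nil => simp
  | cons x xs ih =>
      simp only [List.foldl_cons]
      rw [ih (c + f x), ih (0 + f x)]; ring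

lemma foldl_sum_congr (l : List Int) (f g : Int → Int) (c : Int)
    (h : ∀ s ∈ l, f s = g s) :
    l.foldl (fun r s => r + f s) c = l.foldl (fun r s => r + g s) c := by
  induction l generalizing c with
  | nil => simp
  | cons x xs ih =>
      simp only [List.foldl_cons]
      rw [h x (by simp), ih (c + g x) (fun s hs => h s (by simp [hs]))]

lemma sumTo_split (f : Int → Int) (a m b : Int) (h1 : a ≤ m) (h2 : m ≤ b) :
    sumTo f a b = sumTo f a m + sumTo f m b := by
  unfold sumTo
  rw [PySem.List.pyRange_one_append a m b h1 h2, List.foldl_append,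
      foldl_add_shift]

lemma sumTo_succ_right (f : Int → Int) (a b : Int) (h : a ≤ b) :
    sumTo f a (b + 1) = sumTo f a b + f b := by
  unfold sumTo
  rw [PySem.List.pyRange_one_succ_right h, List.foldl_append]
  simp

-- A equals the spec
lemma fuelA (zp_list : List Int) : ∀ (k : Nat) (fuel : Nat), k < fuel → ∀ o : Int,
    GetCoefficientAuxF zp_list fuel o ((zp_list.length : Int) - k) = Fspec zp_list k o := by
  intro k
  induction k with
  | zero =>
      intro fuel hf o
      obtain ⟨f, rfl⟩ : ∃ f, fuel = f + 1 := ⟨fuel - 1, by omega⟩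
      simp [GetCoefficientAuxF, Fspec]
  | succ k ih =>
      intro fuel hf o
      obtain ⟨f, rfl⟩ : ∃ f, fuel = f + 1 := ⟨fuel - 1, by omega⟩
      have hne : (zp_list.length : Int) - ((k + 1 : Nat) : Int) ≠ (zp_list.length : Int) := by
        push_cast; omega
      simp only [GetCoefficientAuxF, Fspec, if_neg hne]
      have harg : (zp_list.length : Int) - ((k + 1 : Nat) : Int) + 1
          = (zp_list.length : Int) - (k : Int) := by push_cast; ring
      rw [harg]
      congr 1
      exact foldl_sum_congr _ _ _ _ (fun s _ => ih f (by omega) s)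

lemma A_eq_spec (zp_list : List Int) (offset power : Int)
    (h : power ≤ (zp_list.length : Int)) :
    GetCoefficientAux zp_list offset power
      = Fspec zp_list ((zp_list.length : Int) - power).toNat offset := by
  unfold GetCoefficientAux
  have hk : ((zp_list.length : Int) - power).toNat = (zp_list.length : Int) - power := by omega
  have hp : power = (zp_list.length : Int) - (((zp_list.length : Int) - power).toNat : Int) := by
    omega
  calc GetCoefficientAuxF zp_list (((zp_list.length : Int) - power).toNat + 1) offset power
      = GetCoefficientAuxF zp_list (((zp_list.length : Int) - power).toNat + 1) offset
          ((zp_list.length : Int) - (((zp_list.length : Int) - power).toNat : Int)) := by rw [← hp]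
    _ = Fspec zp_list ((zp_list.length : Int) - power).toNat offset :=
        fuelA zp_list _ _ (by omega) offset

-- prefix sums of cur read by the inner loop
def curPSum (cur : List Int) (i : Int) : Int :=
  (PySem.List.pyRange 0 i 1).foldl (fun r t => r + pyAt cur t) 0

lemma curPSum_eq_sumTo (cur : List Int) (i : Int) :
    curPSum cur i = sumTo (fun t => pyAt cur t) 0 i := rfl

lemma curPSum_zero (cur : List Int) : curPSum cur 0 = 0 := by
  simp [curPSum, PySem.List.pyRange_one_eq_nil le_rfl]

lemma curPSum_succ (cur : List Int) (j : Nat) :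
    curPSum cur ((j : Int) + 1) = curPSum cur (j : Int) + pyAt cur (j : Int) := by
  rw [curPSum_eq_sumTo, curPSum_eq_sumTo]
  exact sumTo_succ_right _ 0 (j : Int) (by positivity)

lemma altInner_eq (zp_list cur : List Int) (lo rest : Int) : ∀ j : Nat,
    (PySem.List.pyRange 0 (j : Int) 1).foldl
      (fun (st : List Int × Int) i =>
        (st.1 ++ [pyAt zp_list (lo + i) * st.2], st.2 - pyAt cur i)) ([], rest)
    = ((PySem.List.pyRange 0 (j : Int) 1).map
        (fun i => pyAt zp_list (lo + i) * (rest - curPSum cur i)),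
       rest - curPSum cur (j : Int)) := by
  intro j
  induction j with
  | zero =>
      simp [PySem.List.pyRange_one_eq_nil le_rfl, curPSum_zero]
  | succ j ih =>
      have hc : ((j + 1 : Nat) : Int) = (j : Int) + 1 := by push_cast; ring
      rw [hc, PySem.List.pyRange_one_succ_right (by positivity), List.foldl_append,
          List.map_append, ih]
      simp only [List.foldl_cons, List.foldl_nil, List.map_cons, List.map_nil,
        curPSum_succ]
      refine Prod.ext rfl ?_
      simp only []
      ring

lemma curPSum_table (f : Int → Int) (c d : Int) : ∀ j : Nat, (j : Int) ≤ d - c →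
    curPSum ((PySem.List.pyRange c d 1).map f) (j : Int) = sumTo f c (c + j) := by
  intro j
  induction j with
  | zero => intro _; simp [curPSum_zero, sumTo, PySem.List.pyRange_one_eq_nil le_rfl]
  | succ j ih =>
      intro hj
      have hc : ((j + 1 : Nat) : Int) = (j : Int) + 1 := by push_cast; ring
      rw [hc, curPSum_succ, ih (by push_cast at hj ⊢; omega)]
      have hget : pyAt ((PySem.List.pyRange c d 1).map f) (j : Int) = f (c + (j : Int)) := by
        unfold pyAt
        have := PySem.List.pyGetD_map_pyRange_one f c d j (0 : Int)
          (by push_cast at hj ⊢; omega)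
        unfold PySem.List.pyGetD at this
        exact this
      rw [hget]
      have : c + ((j : Int) + 1) = (c + (j : Int)) + 1 := by ring
      rw [this, sumTo_succ_right _ c _ (by push_cast at hj ⊢; omega)]

lemma sumL_map (f : Int → Int) (l : List Int) :
    (l.map f).foldl (· + ·) 0 = l.foldl (fun r s => r + f s) 0 := by
  rw [List.foldl_map]

lemma Fspec_succ (zp_list : List Int) (k : Nat) (o : Int) :
    Fspec zp_list (k + 1) o
      = pyAt zp_list o * sumTo (Fspec zp_list k) (o + 1) ((zp_list.length : Int) - (k : Int)) := rfl

-- one outer-loop step turns the level-(p+1) table into the level-p table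
lemma step_eq (zp_list : List Int) (offset power p : Int) (k : Nat)
    (hop : offset < power) (_hp : power ≤ p) (hpn : (p + 1) + (k : Int) = (zp_list.length : Int)) :
    (altInner zp_list
        ((PySem.List.pyRange (offset + (p + 1 - power)) (p + 1) 1).map (Fspec zp_list k))
        (offset + (p - power)) (power - offset)
        (((PySem.List.pyRange (offset + (p + 1 - power)) (p + 1) 1).map (Fspec zp_list k)).foldl (· + ·) 0)).1
    = (PySem.List.pyRange (offset + (p - power)) p 1).map (Fspec zp_list (k + 1)) := by
  have hW : ((((power - offset).toNat : Nat)) : Int) = power - offset := by omega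
  have hcl : offset + (p + 1 - power) = offset + (p - power) + 1 := by ring
  unfold altInner
  rw [← hW, altInner_eq, sumL_map]
  simp only []
  have hrest : (PySem.List.pyRange (offset + (p + 1 - power)) (p + 1) 1).foldl
      (fun r s => r + Fspec zp_list k s) 0
      = sumTo (Fspec zp_list k) (offset + (p + 1 - power)) (p + 1) := rfl
  rw [hrest]
  have hmain : ∀ i ∈ PySem.List.pyRange 0 (((power - offset).toNat : Nat) : Int) 1,
      pyAt zp_list (offset + (p - power) + i) *
        (sumTo (Fspec zp_list k) (offset + (p + 1 - power)) (p + 1)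
          - curPSum ((PySem.List.pyRange (offset + (p + 1 - power)) (p + 1) 1).map (Fspec zp_list k)) i)
      = Fspec zp_list (k + 1) (offset + (p - power) + i) := by
    intro i hi
    rw [PySem.List.mem_pyRange_one] at hi
    obtain ⟨hi0, hiW⟩ := hi
    have hji : ((i.toNat : Nat) : Int) = i := by omega
    rw [← hji, curPSum_table (Fspec zp_list k) _ _ i.toNat (by omega), hji]
    rw [Fspec_succ]
    have hnk : (zp_list.length : Int) - (k : Int) = p + 1 := by omega
    rw [hnk]
    have hsplit := sumTo_split (Fspec zp_list k) (offset + (p + 1 - power))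
      (offset + (p + 1 - power) + i) (p + 1) (by omega) (by omega)
    have harg : offset + (p + 1 - power) + i = offset + (p - power) + i + 1 := by ring
    rw [hsplit, harg]
    ring
  rw [List.map_congr_left hmain]
  rw [PySem.List.pyRange_one, PySem.List.pyRange_one, List.map_map, List.map_map]
  have hlen : ((((power - offset).toNat : Nat) : Int) - 0).toNat = (p - (offset + (p - power))).toNat := by
    omega
  rw [hlen]
  exact List.map_congr_left (fun a _ => by simp only [Function.comp]; norm_num)

lemma altLoop_eq (zp_list : List Int) (offset power : Int) (hop : offset < power) :
    ∀ (j : Nat) (p : Int), p = power + (j : Int) - 1 → (p + 1) ≤ (zp_list.length : Int) →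
    altLoop zp_list offset power (power - offset) j p
        ((PySem.List.pyRange (offset + (p + 1 - power)) (p + 1) 1).map
          (Fspec zp_list ((zp_list.length : Int) - (p + 1)).toNat))
    = (PySem.List.pyRange offset power 1).map
        (Fspec zp_list ((zp_list.length : Int) - power).toNat) := by
  intro j
  induction j with
  | zero =>
      intro p hpj hpn
      have hp : p = power - 1 := by push_cast at hpj; omega
      subst hp
      have e1 : offset + (power - 1 + 1 - power) = offset := by ring
      have e2 : power - 1 + 1 = power := by ring
      rw [e1, e2]
      rfl
  | succ j ih =>
      intro p hpj hpn
      have hpw : power ≤ p := by push_cast at hpj; omega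
      show altLoop zp_list offset power (power - offset) j (p - 1)
          (altInner zp_list _ (offset + (p - power)) (power - offset) _).1 = _
      rw [step_eq zp_list offset power p (((zp_list.length : Int) - (p + 1)).toNat) hop hpw
        (by omega)]
      have e3 : (((zp_list.length : Int) - (p + 1)).toNat + 1)
          = ((zp_list.length : Int) - p).toNat := by omega
      rw [e3]
      have h := ih (p - 1) (by push_cast at hpj ⊢; omega) (by omega)
      have e5 : offset + (p - 1 + 1 - power) = offset + (p - power) := by ring
      have e6 : p - 1 + 1 = p := by ring
      rw [e5, e6] at h
      exact h

lemma B_eq_spec (zp_list : List Int) (offset power : Int)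
    (h : power ≤ (zp_list.length : Int)) :
    GetCoefficientAux_alt zp_list offset power
      = Fspec zp_list ((zp_list.length : Int) - power).toNat offset := by
  unfold GetCoefficientAux_alt
  by_cases h1 : power = (zp_list.length : Int)
  · rw [if_pos h1]
    have : ((zp_list.length : Int) - power).toNat = 0 := by omega
    rw [this]
    rfl
  · rw [if_neg h1]
    by_cases h2 : offset ≥ power
    · rw [if_pos h2]
      obtain ⟨k, hk⟩ : ∃ k, ((zp_list.length : Int) - power).toNat = k + 1 :=
        ⟨((zp_list.length : Int) - power).toNat - 1, by omega⟩
      rw [hk, Fspec_succ]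
      have hr : PySem.List.pyRange (offset + 1) ((zp_list.length : Int) - (k : Int)) 1 = [] :=
        PySem.List.pyRange_one_eq_nil (by omega)
      unfold sumTo
      rw [hr]
      simp
    · rw [if_neg h2]
      push Not at h2
      have hF0 : (fun o => pyAt zp_list o) = Fspec zp_list 0 := by funext o; rfl
      have hcur : (PySem.List.pyRange (offset + ((zp_list.length : Int) - power)) (zp_list.length : Int) 1).map (fun o => pyAt zp_list o)
          = (PySem.List.pyRange (offset + (((zp_list.length : Int) - 1) + 1 - power)) (((zp_list.length : Int) - 1) + 1) 1).map
              (Fspec zp_list ((zp_list.length : Int) - (((zp_list.length : Int) - 1) + 1)).toNat) := by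
        rw [hF0]
        have e1 : offset + (((zp_list.length : Int) - 1) + 1 - power)
            = offset + ((zp_list.length : Int) - power) := by ring
        have e2 : ((zp_list.length : Int) - 1) + 1 = (zp_list.length : Int) := by ring
        rw [e1, e2]
        have e4 : ((zp_list.length : Int) - (zp_list.length : Int)).toNat = 0 := by omega
        rw [e4]
      rw [hcur]
      show pyAt (altLoop zp_list offset power (power - offset)
          ((zp_list.length : Int) - power).toNat ((zp_list.length : Int) - 1)
          (List.map (Fspec zp_list ((zp_list.length : Int) - ((zp_list.length : Int) - 1 + 1)).toNat)
            (PySem.List.pyRange (offset + ((zp_list.length : Int) - 1 + 1 - power))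
              ((zp_list.length : Int) - 1 + 1) 1))) 0
        = Fspec zp_list ((zp_list.length : Int) - power).toNat offset
      rw [altLoop_eq zp_list offset power h2 ((zp_list.length : Int) - power).toNat
          ((zp_list.length : Int) - 1) (by omega) (by omega)]
      rw [PySem.List.pyRange_one_cons h2, List.map_cons]
      unfold pyAt
      rw [PySem.List.pyGet?_zero_cons]
      rfl

-- ===== VERDICT (by name: the statement is the Claim_ definition above) =====
theorem GetCoefficientAux_spec : Claim_equal_GetCoefficientAux := by
  intro zp_list offset power _ hpre
  unfold Spec_GetCoefficientAux
  rw [A_eq_spec zp_list offset power hpre.2.2, B_eq_spec zp_list offset power hpre.2.2]
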